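-- pv_equiv track=rewrite | github.com/ddw02141/algorithm_practice_kit | 2019 KAKAO BLIND RECRUITMENT/블록_게임.py | can_make_rectangle
-- ===== SOURCE A (Python) =====
-- def can_make_rectangle(x1, y1, x2, y2, target, n, board):
--     for z in [x1, y1, x2, y2]:
--         if z < 0 or z >= n:
--             return False
--     num_target = 0
--     for x in range(x1, x2 + 1):
--         for y in range(y1, y2 + 1):
--             if board[x][y] == target:
--                 num_target += 1
--             elif board[x][y] != 0:
--                 return False
--             elif sum(board[xx][y] for xx in range(0, x)) != 0:
--                 return False
--     return num_target == 4
-- ===== SOURCE B (Python) =====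
-- def can_make_rectangle(x1, y1, x2, y2, target, n, board):
--     if any(z < 0 or z >= n for z in (x1, y1, x2, y2)):
--         return False
--     if x1 > x2 or y1 > y2:
--         return False  # empty rectangle: cannot contain 4 target cells
--     num_target = 0
--     for y in range(y1, y2 + 1):
--         above = 0  # running prefix sum of board[0..x-1][y]
--         for x in range(0, x2 + 1):
--             v = board[x][y]
--             if x >= x1:
--                 if v == target:
--                     num_target += 1
--                 elif v != 0:
--                     return False
--                 elif above != 0:
--                     return False
--             above += v
--     return num_target == 4
-- ===== Notes on version B (the rewrite author's own statement) =====
-- stated objective: alternative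
-- what changed: B sweeps the board column-major maintaining a running per-column prefix sum (so A's inner sum over the column above each cell disappears) and returns False immediately for an empty rectangle.
-- outside the precondition, e.g. on can_make_rectangle(0, 0, 0, 1, 1, 2, [[0, 0]]): A returns False, B returns False; on can_make_rectangle(1, 0, 1, 0, 1, 2, [[], [5, 5]]): A returns False, B raises IndexError
import Mathlib
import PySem

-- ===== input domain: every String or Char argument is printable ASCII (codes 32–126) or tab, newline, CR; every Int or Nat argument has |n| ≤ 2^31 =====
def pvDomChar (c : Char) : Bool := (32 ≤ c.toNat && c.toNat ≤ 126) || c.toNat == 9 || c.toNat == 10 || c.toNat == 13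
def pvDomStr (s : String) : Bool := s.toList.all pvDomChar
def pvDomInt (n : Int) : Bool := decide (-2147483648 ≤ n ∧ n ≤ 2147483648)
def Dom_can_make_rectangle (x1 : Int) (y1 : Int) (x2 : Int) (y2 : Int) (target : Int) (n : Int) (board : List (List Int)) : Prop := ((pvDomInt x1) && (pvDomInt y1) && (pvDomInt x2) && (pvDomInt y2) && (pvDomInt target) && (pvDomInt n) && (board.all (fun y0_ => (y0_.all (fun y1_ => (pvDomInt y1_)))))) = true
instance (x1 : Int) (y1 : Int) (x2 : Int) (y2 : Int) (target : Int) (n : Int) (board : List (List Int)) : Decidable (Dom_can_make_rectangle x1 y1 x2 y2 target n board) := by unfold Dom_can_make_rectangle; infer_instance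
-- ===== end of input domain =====

-- B replaces A's per-cell re-summation of the column above by a running per-column
-- prefix sum maintained in a column-major sweep, plus an empty-rectangle fast path
-- (objective: alternative — no re-summation of the column above each cell).

-- board[x][y] (in range under Pre_; the default is never used there)
def pvCell (board : List (List Int)) (x y : Int) : Int :=
  PySem.List.pyGetD (PySem.List.pyGetD board x []) y 0

-- ===== PORT A =====
-- sum(board[xx][y] for xx in range(0, x))
def pvColSum (board : List (List Int)) (x y : Int) : Int :=
  ((PySem.List.pyRange 0 x 1).map (fun xx => pvCell board xx y)).sum

-- inner 'for y in range(y1, y2+1)' loop; none = early 'return False'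
def pvA_row (board : List (List Int)) (target x : Int) (ys : List Int) (cnt : Int) : Option Int :=
  match ys with
  | [] => some cnt
  | y :: ys' =>
    if pvCell board x y == target then pvA_row board target x ys' (cnt + 1)
    else if pvCell board x y != 0 then none
    else if pvColSum board x y != 0 then none
    else pvA_row board target x ys' cnt

-- outer 'for x in range(x1, x2+1)' loop
def pvA_rows (board : List (List Int)) (target y1 y2 : Int) (xs : List Int) (cnt : Int) : Option Int :=
  match xs with
  | [] => some cnt
  | x :: xs' =>
    match pvA_row board target x (PySem.List.pyRange y1 (y2 + 1) 1) cnt with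
    | none => none
    | some c => pvA_rows board target y1 y2 xs' c

def can_make_rectangle (x1 : Int) (y1 : Int) (x2 : Int) (y2 : Int) (target : Int) (n : Int) (board : List (List Int)) : Bool :=
  if [x1, y1, x2, y2].any (fun z => z < 0 || n ≤ z) then false
  else
    match pvA_rows board target y1 y2 (PySem.List.pyRange x1 (x2 + 1) 1) 0 with
    | none => false
    | some c => c == 4

-- ===== PORT B =====
-- inner 'for x in range(0, x2+1)' loop of Source B, carrying the running prefix 'above'
def pvB_col (board : List (List Int)) (target x1 y : Int) (xs : List Int) (above cnt : Int) : Option Int :=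
  match xs with
  | [] => some cnt
  | x :: xs' =>
    let v := pvCell board x y
    if x1 ≤ x then
      if v == target then pvB_col board target x1 y xs' (above + v) (cnt + 1)
      else if v != 0 then none
      else if above != 0 then none
      else pvB_col board target x1 y xs' (above + v) cnt
    else pvB_col board target x1 y xs' (above + v) cnt

-- outer 'for y in range(y1, y2+1)' loop of Source B
def pvB_cols (board : List (List Int)) (target x1 x2 : Int) (ys : List Int) (cnt : Int) : Option Int :=
  match ys with
  | [] => some cnt
  | y :: ys' =>
    match pvB_col board target x1 y (PySem.List.pyRange 0 (x2 + 1) 1) 0 cnt with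
    | none => none
    | some c => pvB_cols board target x1 x2 ys' c

def can_make_rectangle_alt (x1 : Int) (y1 : Int) (x2 : Int) (y2 : Int) (target : Int) (n : Int) (board : List (List Int)) : Bool :=
  if [x1, y1, x2, y2].any (fun z => z < 0 || n ≤ z) then false
  else if x2 < x1 || y2 < y1 then false
  else
    match pvB_cols board target x1 x2 (PySem.List.pyRange y1 (y2 + 1) 1) 0 with
    | none => false
    | some c => c == 4

-- ===== PRECONDITION & SPEC =====
-- Pre_ excludes boards smaller than n×n when all four coordinates pass the bounds
-- check: there A raises IndexError on most such inputs, and where it happens to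
-- return (an early False before reaching a missing row/column) we do not claim it.
def Pre_can_make_rectangle (x1 : Int) (y1 : Int) (x2 : Int) (y2 : Int) (target : Int) (n : Int) (board : List (List Int)) : Prop :=
  (x1 < 0 ∨ n ≤ x1 ∨ y1 < 0 ∨ n ≤ y1 ∨ x2 < 0 ∨ n ≤ x2 ∨ y2 < 0 ∨ n ≤ y2) ∨
  (n ≤ (board.length : Int) ∧ ∀ row ∈ board, n ≤ (row.length : Int))
instance (x1 : Int) (y1 : Int) (x2 : Int) (y2 : Int) (target : Int) (n : Int) (board : List (List Int)) : Decidable (Pre_can_make_rectangle x1 y1 x2 y2 target n board) := by unfold Pre_can_make_rectangle; infer_instance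

def pvWitness_can_make_rectangle : Int × Int × Int × Int × Int × Int × List (List Int) :=
  (0, 0, 1, 1, 1, 2, [[1, 1], [1, 1]])

def Spec_can_make_rectangle (x1 : Int) (y1 : Int) (x2 : Int) (y2 : Int) (target : Int) (n : Int) (board : List (List Int)) (out : Bool) : Prop := out = can_make_rectangle_alt x1 y1 x2 y2 target n board
instance (x1 : Int) (y1 : Int) (x2 : Int) (y2 : Int) (target : Int) (n : Int) (board : List (List Int)) (out : Bool) : Decidable (Spec_can_make_rectangle x1 y1 x2 y2 target n board out) := by unfold Spec_can_make_rectangle; infer_instance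

-- ===== CLAIM (what is proved, stated in full; the proofs are below) =====
def Claim_equal_can_make_rectangle : Prop := ∀ (x1 : Int) (y1 : Int) (x2 : Int) (y2 : Int) (target : Int) (n : Int) (board : List (List Int)), Dom_can_make_rectangle x1 y1 x2 y2 target n board → Pre_can_make_rectangle x1 y1 x2 y2 target n board → Spec_can_make_rectangle x1 y1 x2 y2 target n board (can_make_rectangle x1 y1 x2 y2 target n board)

-- ===== LEMMAS AND PROOFS =====

-- a cell of the queried rectangle that makes A (and B) answer False
def pvBad (board : List (List Int)) (target x y : Int) : Bool :=
  (pvCell board x y != target) && ((pvCell board x y != 0) || (pvColSum board x y != 0))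

theorem pvColSum_succ (board : List (List Int)) (a y : Int) (ha : 0 ≤ a) :
    pvColSum board (a + 1) y = pvColSum board a y + pvCell board a y := by
  unfold pvColSum
  rw [PySem.List.pyRange_one_succ_right ha]
  simp

theorem pvA_row_eq (board : List (List Int)) (target x : Int) :
    ∀ (ys : List Int) (cnt : Int),
      pvA_row board target x ys cnt =
        if ys.any (fun y => pvBad board target x y) then none
        else some (cnt + (ys.countP (fun y => pvCell board x y == target) : Int)) := by
  intro ys
  induction ys with
  | nil => intro cnt; simp [pvA_row]
  | cons y ys' ih =>
    intro cnt
    rw [pvA_row]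
    by_cases h1 : pvCell board x y = target
    · have hb : pvBad board target x y = false := by simp [pvBad, h1]
      simp only [beq_self_eq_true, if_true, ih, List.any_cons, hb, Bool.false_or,
        List.countP_cons, h1, beq_self_eq_true, if_true]
      split_ifs with h
      · rfl
      · congr 1; push_cast; ring
    · have hcell : (pvCell board x y == target) = false := by simp [h1]
      by_cases h2 : pvCell board x y = 0
      · have ht : ((0 : Int) == target) = false := by
          simp only [beq_eq_false_iff_ne, ne_eq]
          exact fun he => h1 (h2.trans he)
        by_cases h3 : pvColSum board x y = 0
        · have hb : pvBad board target x y = false := by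
            simp [pvBad, h2, h3]
          simp only [Bool.false_eq_true, if_false, h2, h3, bne_self_eq_false,
            ih, List.any_cons, hb, Bool.false_or, List.countP_cons, ht, add_zero]
        · have hb : pvBad board target x y = true := by
            simp [pvBad, h2, h3]
            exact fun he => h1 (h2.trans he)
          simp [h2, h3, hb, ht]
      · have hb : pvBad board target x y = true := by
          simp [pvBad, h2]
          exact h1
        simp [hcell, h2, hb]

theorem pvA_rows_eq (board : List (List Int)) (target y1 y2 : Int) :
    ∀ (xs : List Int) (cnt : Int),
      pvA_rows board target y1 y2 xs cnt =
        if xs.any (fun x => (PySem.List.pyRange y1 (y2 + 1) 1).any (fun y => pvBad board target x y)) then none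
        else some (cnt + ((xs.map (fun x => ((PySem.List.pyRange y1 (y2 + 1) 1).countP (fun y => pvCell board x y == target) : Int))).sum)) := by
  intro xs
  induction xs with
  | nil => intro cnt; simp [pvA_rows]
  | cons x xs' ih =>
    intro cnt
    rw [pvA_rows, pvA_row_eq]
    by_cases h : ((PySem.List.pyRange y1 (y2 + 1) 1).any fun y => pvBad board target x y) = true
    · simp [h]
    · simp only [h, Bool.false_eq_true, if_false, ih, List.any_cons, h, Bool.false_or,
        List.map_cons, List.sum_cons]
      split_ifs with h2
      · rfl
      · congr 1; ring

theorem pvB_col_eq (board : List (List Int)) (target x1 y : Int) (b : Int) :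
    ∀ (k : Nat) (a above cnt : Int), 0 ≤ a → (b - a).toNat = k → above = pvColSum board a y →
      pvB_col board target x1 y (PySem.List.pyRange a b 1) above cnt =
        if (PySem.List.pyRange a b 1).any (fun x => decide (x1 ≤ x) && pvBad board target x y) then none
        else some (cnt + ((PySem.List.pyRange a b 1).countP (fun x => decide (x1 ≤ x) && (pvCell board x y == target)) : Int)) := by
  intro k
  induction k with
  | zero =>
    intro a above cnt ha hk hab
    rw [PySem.List.pyRange_one_eq_nil (by omega)]
    simp [pvB_col]
  | succ k ih =>
    intro a above cnt ha hk hab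
    rw [PySem.List.pyRange_one_cons (by omega)]
    rw [pvB_col]
    have hs : above + pvCell board a y = pvColSum board (a + 1) y := by
      rw [pvColSum_succ board a y ha, hab]
    have ih' : ∀ c : Int, pvB_col board target x1 y (PySem.List.pyRange (a + 1) b 1) (above + pvCell board a y) c =
        if (PySem.List.pyRange (a + 1) b 1).any (fun x => decide (x1 ≤ x) && pvBad board target x y) then none
        else some (c + ((PySem.List.pyRange (a + 1) b 1).countP (fun x => decide (x1 ≤ x) && (pvCell board x y == target)) : Int)) :=
      fun c => ih (a + 1) _ c (by omega) (by omega) hs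
    by_cases hg : x1 ≤ a
    · rw [if_pos hg]
      by_cases h1 : pvCell board a y = target
      · have hb : (decide (x1 ≤ a) && pvBad board target a y) = false := by
          simp [pvBad, h1]
        have hc : (decide (x1 ≤ a) && (pvCell board a y == target)) = true := by
          simp [h1, hg]
        rw [if_pos (by simp [h1] : (pvCell board a y == target) = true)]
        rw [ih']
        simp only [List.any_cons, hb, Bool.false_or, List.countP_cons, hc, if_true]
        split_ifs with h
        · rfl
        · congr 1; push_cast; ring
      · have hcf : (pvCell board a y == target) = false := by simp [h1]
        rw [if_neg (by simp [h1])]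
        by_cases h2 : pvCell board a y = 0
        · rw [if_neg (by simp [h2])]
          have hcc : (decide (x1 ≤ a) && (pvCell board a y == target)) = false := by
            simp [hcf]
          by_cases h3 : above = 0
          · have hcs : pvColSum board a y = 0 := hab.symm.trans h3
            have hb : (decide (x1 ≤ a) && pvBad board target a y) = false := by
              simp [pvBad, h2, hcs]
            rw [if_neg (by simp [h3])]
            rw [ih']
            simp only [List.any_cons, hb, Bool.false_or, List.countP_cons, hcc,
              Bool.false_eq_true, if_false, add_zero]
          · have hcs : ¬ pvColSum board a y = 0 := fun he => h3 (hab.trans he)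
            have hb : (decide (x1 ≤ a) && pvBad board target a y) = true := by
              simp [pvBad, hg, h2, hcs]
              exact fun he => h1 (h2.trans he)
            rw [if_pos (by simp [h3])]
            simp [List.any_cons, hb]
        · rw [if_pos (by simp [h2])]
          have hb : (decide (x1 ≤ a) && pvBad board target a y) = true := by
            simp [pvBad, hg, h2]
            exact h1
          simp [List.any_cons, hb]
    · rw [if_neg hg]
      rw [ih']
      have hgf : decide (x1 ≤ a) = false := by simp [hg]
      simp only [List.any_cons, hgf, Bool.false_and, Bool.false_or, List.countP_cons,
        Bool.false_eq_true, if_false, add_zero]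

theorem pvB_cols_eq (board : List (List Int)) (target x1 x2 : Int) :
    ∀ (ys : List Int) (cnt : Int),
      pvB_cols board target x1 x2 ys cnt =
        if ys.any (fun y => (PySem.List.pyRange 0 (x2 + 1) 1).any (fun x => decide (x1 ≤ x) && pvBad board target x y)) then none
        else some (cnt + (ys.map (fun y => ((PySem.List.pyRange 0 (x2 + 1) 1).countP (fun x => decide (x1 ≤ x) && (pvCell board x y == target)) : Int))).sum) := by
  intro ys
  induction ys with
  | nil => intro cnt; simp [pvB_cols]
  | cons y ys' ih =>
    intro cnt
    rw [pvB_cols]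
    have h0 : pvColSum board 0 y = 0 := by simp [pvColSum, PySem.List.pyRange_one_eq_nil (le_refl 0)]
    rw [pvB_col_eq board target x1 y (x2 + 1) ((x2 + 1 - 0).toNat) 0 0 cnt (le_refl 0) rfl h0.symm]
    by_cases h : ((PySem.List.pyRange 0 (x2 + 1) 1).any fun x => decide (x1 ≤ x) && pvBad board target x y) = true
    · simp [h]
    · simp only [h, Bool.false_eq_true, if_false, ih, List.any_cons, h, Bool.false_or,
        List.map_cons, List.sum_cons]
      split_ifs with h2
      · rfl
      · congr 1; ring

-- the guard x1 ≤ x over range(0, x2+1) is the range(x1, x2+1) part (0 ≤ x1)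
theorem pvCount_guard (x1 x2 : Int) (hx1 : 0 ≤ x1) (p : Int → Bool) :
    (PySem.List.pyRange 0 (x2 + 1) 1).countP (fun x => decide (x1 ≤ x) && p x) =
      (PySem.List.pyRange x1 (x2 + 1) 1).countP p := by
  by_cases h : x1 ≤ x2 + 1
  · rw [PySem.List.pyRange_one_append 0 x1 (x2 + 1) hx1 h, List.countP_append]
    have h0 : (PySem.List.pyRange 0 x1 1).countP (fun x => decide (x1 ≤ x) && p x) = 0 := by
      rw [List.countP_eq_zero]
      intro a hap
      rw [PySem.List.mem_pyRange_one] at hap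
      simp only [Bool.and_eq_true, decide_eq_true_eq]
      exact fun hc => absurd hc.1 (by omega)
    rw [h0, Nat.zero_add]
    apply List.countP_congr
    intro x hx
    rw [PySem.List.mem_pyRange_one] at hx
    simp [hx.1]
  · rw [PySem.List.pyRange_one_eq_nil (a := x1) (by omega), List.countP_nil,
      List.countP_eq_zero]
    intro a hap
    rw [PySem.List.mem_pyRange_one] at hap
    simp only [Bool.and_eq_true, decide_eq_true_eq]
    exact fun hc => absurd hc.1 (by omega)

theorem pvAny_guard (x1 x2 : Int) (hx1 : 0 ≤ x1) (p : Int → Bool) :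
    (PySem.List.pyRange 0 (x2 + 1) 1).any (fun x => decide (x1 ≤ x) && p x) =
      (PySem.List.pyRange x1 (x2 + 1) 1).any p := by
  apply Bool.eq_iff_iff.mpr
  simp only [List.any_eq_true, PySem.List.mem_pyRange_one, Bool.and_eq_true, decide_eq_true_eq]
  constructor
  · rintro ⟨x, ⟨h0, h2⟩, hle, hp⟩
    exact ⟨x, ⟨hle, h2⟩, hp⟩
  · rintro ⟨x, ⟨hle, h2⟩, hp⟩
    exact ⟨x, ⟨by omega, h2⟩, hle, hp⟩

theorem pvAny_comm (xs ys : List Int) (p : Int → Int → Bool) :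
    xs.any (fun x => ys.any (fun y => p x y)) = ys.any (fun y => xs.any (fun x => p x y)) := by
  apply Bool.eq_iff_iff.mpr
  simp only [List.any_eq_true]
  constructor
  · rintro ⟨x, hx, y, hy, hp⟩
    exact ⟨y, hy, x, hx, hp⟩
  · rintro ⟨y, hy, x, hx, hp⟩
    exact ⟨x, hx, y, hy, hp⟩

theorem pvSum_comm (xs ys : List Int) (f : Int → Int → Int) :
    (xs.map (fun x => (ys.map (f x)).sum)).sum =
      (ys.map (fun y => (xs.map (fun x => f x y)).sum)).sum := by
  induction xs with
  | nil => simp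
  | cons x xs ih =>
    simp only [List.map_cons, List.sum_cons, ih]
    rw [← PySem.List.sum_map_add_int]

-- ===== VERDICT (by name: the statement is the Claim_ definition above) =====
theorem can_make_rectangle_spec : Claim_equal_can_make_rectangle := by
  intro x1 y1 x2 y2 target n board _ _
  unfold Spec_can_make_rectangle
  unfold can_make_rectangle can_make_rectangle_alt
  by_cases hb : ([x1, y1, x2, y2].any (fun z => z < 0 || n ≤ z)) = true
  · simp [hb]
  · simp only [hb, if_false, Bool.false_eq_true]
    have hx1 : 0 ≤ x1 := by simp [List.any_cons] at hb; omega
    by_cases hE : (x2 < x1 ∨ y2 < y1)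
    · rw [if_pos (by simpa using hE)]
      rw [pvA_rows_eq]
      rcases hE with hE | hE
      · rw [PySem.List.pyRange_one_eq_nil (a := x1) (by omega)]
        simp
      · rw [PySem.List.pyRange_one_eq_nil (a := y1) (by omega)]
        simp
    · rw [if_neg (by simpa using hE)]
      rw [pvA_rows_eq, pvB_cols_eq]
      have hany : ((PySem.List.pyRange x1 (x2 + 1) 1).any fun x =>
            (PySem.List.pyRange y1 (y2 + 1) 1).any fun y => pvBad board target x y) =
          ((PySem.List.pyRange y1 (y2 + 1) 1).any fun y =>
            (PySem.List.pyRange 0 (x2 + 1) 1).any fun x => decide (x1 ≤ x) && pvBad board target x y) := by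
        rw [show (fun y => (PySem.List.pyRange 0 (x2 + 1) 1).any fun x =>
              decide (x1 ≤ x) && pvBad board target x y) =
            (fun y => (PySem.List.pyRange x1 (x2 + 1) 1).any fun x => pvBad board target x y) from
          funext fun y => pvAny_guard x1 x2 hx1 (fun x => pvBad board target x y)]
        rw [pvAny_comm]
      have hsum : ((PySem.List.pyRange x1 (x2 + 1) 1).map fun x =>
            ((PySem.List.pyRange y1 (y2 + 1) 1).countP fun y => pvCell board x y == target : Int)).sum =
          ((PySem.List.pyRange y1 (y2 + 1) 1).map fun y =>
            ((PySem.List.pyRange 0 (x2 + 1) 1).countP fun x => decide (x1 ≤ x) && (pvCell board x y == target) : Int)).sum := by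
        rw [show (fun y => ((PySem.List.pyRange 0 (x2 + 1) 1).countP fun x =>
              decide (x1 ≤ x) && (pvCell board x y == target) : Int)) =
            (fun y => ((PySem.List.pyRange x1 (x2 + 1) 1).countP fun x =>
              pvCell board x y == target : Int)) from
          funext fun y => by rw [pvCount_guard x1 x2 hx1 (fun x => pvCell board x y == target)]]
        simp only [← PySem.List.sum_map_ite_one_zero]
        rw [pvSum_comm (PySem.List.pyRange x1 (x2 + 1) 1) (PySem.List.pyRange y1 (y2 + 1) 1)
          (fun x y => if (pvCell board x y == target) = true then 1 else 0)]
      rw [hany, hsum]
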